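-- pv_equiv track=rewrite | github.com/junjuning/Algorithm_python | Programmers/Level2/주식가격.py | solution
-- ===== SOURCE A (Python) =====
-- def solution(prices):
--     answer = [0, 1]
--     num = 1
--     minNow = min(prices[len(prices)-2:])
--     for i in range(len(prices) - 3, -1, -1):
--         num += 1
--         if prices[i] > minNow:
--             for j in range(i + 1, len(prices)):
--                 if prices[j] < prices[i]:
--                     answer.append(j - i)
--                     break
--         else:
--             answer.append(num)
--             minNow = prices[i]
--
--     answer.reverse()
--     return answer
-- ===== SOURCE B (Python) =====
-- def solution(prices):
--     n = len(prices)
--     answer = [0] * n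
--     stack = []
--     for i, p in enumerate(prices):
--         while stack and prices[stack[-1]] > p:
--             j = stack.pop()
--             answer[j] = i - j
--         stack.append(i)
--     for j in stack:
--         answer[j] = n - 1 - j
--     return answer
-- ===== Notes on version B (the rewrite author's own statement) =====
-- stated objective: faster
-- what changed: Replaces the reverse scan with a minNow accumulator plus a nested forward rescan per index by a single left-to-right pass with a monotonic index stack that assigns each duration exactly once into a preallocated array.
-- intended difference: On single-element lists A returns a two-element list (its hard-coded seed reversed), while B returns the correct one-element durations list. — e.g. on solution([1]): A returns [1, 0], B returns [0]
import Mathlib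
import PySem

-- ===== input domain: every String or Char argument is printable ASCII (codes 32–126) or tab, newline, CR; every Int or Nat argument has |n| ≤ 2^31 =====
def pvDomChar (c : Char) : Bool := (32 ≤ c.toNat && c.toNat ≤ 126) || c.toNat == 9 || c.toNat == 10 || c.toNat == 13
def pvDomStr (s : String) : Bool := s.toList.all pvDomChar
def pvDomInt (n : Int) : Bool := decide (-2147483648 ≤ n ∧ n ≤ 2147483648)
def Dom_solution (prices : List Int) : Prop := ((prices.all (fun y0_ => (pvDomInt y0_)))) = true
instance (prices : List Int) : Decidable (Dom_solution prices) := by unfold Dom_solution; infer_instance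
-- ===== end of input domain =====

-- B replaces A's reverse scan with nested forward rescans by a single left-to-right monotonic-stack pass (return value only; neither mutates its argument).

-- ===== PORT A =====
-- inner 'for j in range(i+1, len(prices)): if prices[j] < prices[i]: answer.append(j-i); break'
-- (indices produced by range are always in bounds, so the pyGetD default 0 is never used)
def solAInner (prices : List Int) (i : Int) (js : List Int) : Option Int :=
  match js with
  | [] => none
  | j :: rest =>
    if PySem.List.pyGetD prices j 0 < PySem.List.pyGetD prices i 0 then some (j - i)
    else solAInner prices i rest

def solution (prices : List Int) : List Int :=
  let n : Int := prices.length
  match PySem.List.min? (PySem.List.slice prices (some (n - 2)) none) (fun x => x) with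
  | none => []   -- Python raises ValueError here (min of empty slice, only when prices = []); excluded by Pre_
  | some m0 =>
    let st := (PySem.List.pyRange (n - 3) (-1) (-1)).foldl
      (fun (st : List Int × Int × Int) i =>
        let answer := st.1
        let num := st.2.1 + 1
        let minNow := st.2.2
        if PySem.List.pyGetD prices i 0 > minNow then
          match solAInner prices i (PySem.List.pyRange (i + 1) n 1) with
          | some d => (answer ++ [d], num, minNow)
          | none => (answer, num, minNow)
        else (answer ++ [num], num, PySem.List.pyGetD prices i 0))
      ([0, 1], 1, m0)
    st.1.reverse

-- ===== PORT B =====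
-- the stack is kept top-first (Lean list head = Python stack[-1]); pops/pushes are head operations
def popLoop (prices : List Int) (i : Nat) (p : Int) (answer : List Int) (stack : List Nat) :
    List Int × List Nat :=
  match stack with
  | [] => (answer, [])
  | j :: rest =>
    if p < prices.getD j 0 then popLoop prices i p (answer.set j ((i : Int) - (j : Int))) rest
    else (answer, j :: rest)

-- 'for i, p in enumerate(prices): …'
def mainLoopB (prices : List Int) (i : Nat) (rest : List Int) (answer : List Int)
    (stack : List Nat) : List Int × List Nat :=
  match rest with
  | [] => (answer, stack)
  | p :: rest' =>
    let as := popLoop prices i p answer stack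
    mainLoopB prices (i + 1) rest' as.1 (i :: as.2)

def solution_alt (prices : List Int) : List Int :=
  let n := prices.length
  let as := mainLoopB prices 0 prices (List.replicate n 0) []
  -- 'for j in stack: answer[j] = n - 1 - j' iterates bottom-first, hence the reverse
  (as.2.reverse).foldl (fun ans j => ans.set j ((n : Int) - 1 - (j : Int))) as.1

-- ===== PRECONDITION & SPEC =====
-- Pre_ excludes only the empty list, on which A raises ValueError (min of an empty slice).
def Pre_solution (prices : List Int) : Prop := prices ≠ []
instance (prices : List Int) : Decidable (Pre_solution prices) := by unfold Pre_solution; infer_instance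
def pvWitness_solution : List Int := [5, 2, 3]

-- On single-element lists A returns a two-element list (its hard-coded seed reversed), while B
-- returns the correct one-element durations list.
def D_solution (prices : List Int) : Prop := prices.length = 1
instance (prices : List Int) : Decidable (D_solution prices) := by unfold D_solution; infer_instance

def Spec_solution (prices : List Int) (out : List Int) : Prop :=
  ¬ D_solution prices → out = solution_alt prices
instance (prices : List Int) (out : List Int) : Decidable (Spec_solution prices out) := by
  unfold Spec_solution; infer_instance

def pvDiffWitness_solution : List Int := [1]
def pvDiffWitnessOut_solution : (List Int) × (List Int) := ([1, 0], [0])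

-- ===== CLAIM (what is proved, stated in full; the proofs are below) =====
def Claim_unchanged_solution : Prop :=
  ∀ (prices : List Int), Dom_solution prices → Pre_solution prices →
    Spec_solution prices (solution prices)
def Claim_changed_solution : Prop :=
  Dom_solution (pvDiffWitness_solution) ∧ Pre_solution (pvDiffWitness_solution) ∧
    D_solution (pvDiffWitness_solution) ∧
    solution (pvDiffWitness_solution) = pvDiffWitnessOut_solution.1 ∧
    solution_alt (pvDiffWitness_solution) = pvDiffWitnessOut_solution.2 ∧
    pvDiffWitnessOut_solution.1 ≠ pvDiffWitnessOut_solution.2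
def Claim_exact_solution : Prop :=
  ∀ (prices : List Int), Dom_solution prices → Pre_solution prices → D_solution prices →
    solution prices ≠ solution_alt prices

-- ===== LEMMAS AND PROOFS =====

-- The common specification both ports are proved equal to (on lists of length >= 2 for A):
-- nse j = first index k > j with prices[k] < prices[j]; dur j = the published duration.
def nse (prices : List Int) (j : Nat) : Option Nat :=
  (List.range' (j + 1) (prices.length - (j + 1))).find?
    (fun k => prices.getD k 0 < prices.getD j 0)
def dur (prices : List Int) (j : Nat) : Int :=
  match nse prices j with
  | some k => (k : Int) - (j : Int)
  | none => (prices.length : Int) - 1 - (j : Int)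
def keeps (prices : List Int) (i j : Nat) : Bool :=
  (List.range' (j + 1) (i - (j + 1))).all (fun k => !(prices.getD k 0 < prices.getD j 0))
def ansAt (prices : List Int) (i j : Nat) : Int :=
  match nse prices j with
  | some k => if k < i then (k : Int) - (j : Int) else 0
  | none => 0
def stk (prices : List Int) (i : Nat) : List Nat :=
  ((List.range i).filter (keeps prices i)).reverse

-- ---------- A-side ----------
theorem solAInner_natlist (prices : List Int) (c : Nat) (L : List Nat) :
    solAInner prices (c : Int) (List.map (Nat.cast : Nat → Int) L) =
      Option.map (fun k : Nat => ((k : Int) - (c : Int)))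
        (L.find? (fun k => prices.getD k 0 < prices.getD c 0)) := by
  induction L with
  | nil => rfl
  | cons j rest ih =>
      simp only [List.map_cons, solAInner, PySem.List.pyGetD_natCast, List.find?_cons]
      by_cases h : prices[j]?.getD 0 < prices[c]?.getD 0
      · simp [h]
      · simp only [List.getD_eq_getElem?_getD] at ih
        simp [h, ih]
theorem pyRange_cast (a n : Nat) :
    PySem.List.pyRange (a : Int) ((a + n : Nat) : Int) 1 = List.map (Nat.cast : Nat → Int) (List.range' a n) := by
  have h : (((a + n : Nat) : Int) - (a : Int)).toNat = n := by omega
  rw [PySem.List.pyRange_one, h, List.range'_eq_map_range, List.map_map]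
  apply List.map_congr_left
  intro k hk
  simp
theorem solAInner_eq (prices : List Int) (c : Nat) :
    solAInner prices (c : Int) (PySem.List.pyRange ((c : Int) + 1) (prices.length : Int) 1) =
      Option.map (fun k : Nat => ((k : Int) - (c : Int))) (nse prices c) := by
  by_cases hc : c + 1 ≤ prices.length
  · have h1 : ((c : Int) + 1) = ((c + 1 : Nat) : Int) := by push_cast; ring
    have h2 : (prices.length : Int) = (((c + 1) + (prices.length - (c + 1)) : Nat) : Int) := by omega
    rw [h1, h2, pyRange_cast, solAInner_natlist, nse]
  · have h2 : PySem.List.pyRange ((c : Int) + 1) (prices.length : Int) 1 = [] := by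
      apply PySem.List.pyRange_one_eq_nil; omega
    have h3 : prices.length - (c + 1) = 0 := by omega
    rw [h2, nse, h3]
    rfl
def stepA (prices : List Int) (st : List Int × Int × Int) (i : Int) : List Int × Int × Int :=
  let answer := st.1
  let num := st.2.1 + 1
  let minNow := st.2.2
  if PySem.List.pyGetD prices i 0 > minNow then
    match solAInner prices i (PySem.List.pyRange (i + 1) (prices.length : Int) 1) with
    | some d => (answer ++ [d], num, minNow)
    | none => (answer, num, minNow)
  else (answer ++ [num], num, PySem.List.pyGetD prices i 0)
theorem stepA_gt (prices : List Int) (c k : Nat) (answer : List Int) (num minNow : Int)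
    (h : prices.getD c 0 > minNow) (hfind : nse prices c = some k) :
    stepA prices (answer, num, minNow) (c : Int) =
      (answer ++ [(k : Int) - (c : Int)], num + 1, minNow) := by
  unfold stepA
  dsimp only
  rw [PySem.List.pyGetD_natCast, if_pos h, solAInner_eq, hfind]
  rfl
theorem stepA_le (prices : List Int) (c : Nat) (answer : List Int) (num minNow : Int)
    (h : ¬ prices.getD c 0 > minNow) :
    stepA prices (answer, num, minNow) (c : Int) =
      (answer ++ [num + 1], num + 1, prices.getD c 0) := by
  unfold stepA
  dsimp only
  rw [PySem.List.pyGetD_natCast, if_neg h]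
theorem nse_isSome (prices : List Int) (c m : Nat) (hm : m < prices.length) (hcm : c < m)
    (hlt : prices.getD m 0 < prices.getD c 0) : (nse prices c).isSome := by
  rw [nse, List.find?_isSome]
  exact ⟨m, by rw [List.mem_range'_1]; omega, by simpa using hlt⟩
theorem nse_none_of_min (prices : List Int) (c : Nat) (minNow : Int)
    (hmin : ∀ x ∈ prices.drop (c + 1), minNow ≤ x)
    (hle : prices.getD c 0 ≤ minNow) : nse prices c = none := by
  rw [nse, List.find?_eq_none]
  intro k hk
  rw [List.mem_range'_1] at hk
  have hk2 : k < prices.length := by omega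
  have hmem' : prices[k] ∈ prices.drop (c + 1) := by
    rw [List.mem_iff_getElem]
    exact ⟨k - (c + 1), by simp; omega, by rw [List.getElem_drop]; congr 1; omega⟩
  have h1 := hmin _ hmem'
  simp only [decide_eq_true_eq]
  rw [List.getD_eq_getElem _ _ hk2]
  omega
theorem loopA (prices : List Int) : ∀ (c : Nat), c + 2 ≤ prices.length →
    ∀ (answer : List Int) (minNow : Int),
      (∀ x ∈ prices.drop c, minNow ≤ x) → minNow ∈ prices.drop c →
      ((PySem.List.pyRange ((c : Int) - 1) (-1) (-1)).foldl (stepA prices)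
        (answer, (prices.length : Int) - 1 - (c : Int), minNow)).1 =
      answer ++ (List.range c).reverse.map (dur prices) := by
  intro c
  induction c with
  | zero =>
      intro _ answer minNow _ _
      rw [PySem.List.pyRange_neg_one_eq_nil (by omega)]
      simp
  | succ c ih =>
      intro hc answer minNow hmin hmem
      have hcn : c < prices.length := by omega
      have hgetD : prices.getD c 0 = prices[c] := List.getD_eq_getElem prices 0 hcn
      have hdropc : prices.drop c = prices[c] :: prices.drop (c + 1) :=
        List.drop_eq_getElem_cons hcn
      have hcast : ((c + 1 : Nat) : Int) - 1 = ((c : Nat) : Int) := by push_cast; ring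
      rw [hcast, PySem.List.pyRange_neg_one_cons (by omega), List.foldl_cons]
      have hnum : (prices.length : Int) - 1 - ((c + 1 : Nat) : Int) + 1
          = (prices.length : Int) - 1 - (c : Int) := by push_cast; ring
      by_cases hgt : prices.getD c 0 > minNow
      · obtain ⟨m, hm1, hm2⟩ := List.mem_iff_getElem.mp hmem
        have hm1' : m < prices.length - (c + 1) := by simpa using hm1
        have hsome := nse_isSome prices c (c + 1 + m) (by omega) (by omega)
          (by rw [List.getD_eq_getElem _ _ (by omega : c + 1 + m < prices.length)]
              rw [List.getElem_drop] at hm2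
              rw [hm2, hgetD] at *
              omega)
        obtain ⟨k, hfind⟩ := Option.isSome_iff_exists.mp hsome
        rw [stepA_gt prices c k answer _ minNow hgt hfind, hnum]
        have hdur : dur prices c = (k : Int) - (c : Int) := by rw [dur, hfind]
        rw [ih (by omega) (answer ++ [(k : Int) - (c : Int)]) minNow
          (by rw [hdropc]; intro x hx
              rcases List.mem_cons.mp hx with h | h
              · subst h; rw [hgetD] at hgt; omega
              · exact hmin x h)
          (by rw [hdropc]; exact List.mem_cons_of_mem _ hmem)]
        rw [List.range_succ, List.reverse_append, List.map_append, ← hdur]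
        simp
      · rw [stepA_le prices c answer _ minNow hgt, hnum]
        have hle : prices.getD c 0 ≤ minNow := by omega
        have hnone : nse prices c = none := nse_none_of_min prices c minNow hmin hle
        have hdur : dur prices c = (prices.length : Int) - 1 - (c : Int) := by rw [dur, hnone]
        rw [ih (by omega) (answer ++ [(prices.length : Int) - 1 - (c : Int)]) (prices.getD c 0)
          (by rw [hdropc]; intro x hx
              rcases List.mem_cons.mp hx with h | h
              · subst h; rw [hgetD]
              · exact le_trans hle (hmin x h))
          (by rw [hdropc, hgetD]; exact List.mem_cons_self)]
        rw [List.range_succ, List.reverse_append, List.map_append, ← hdur]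
        simp
theorem dur_last (prices : List Int) (h : 1 ≤ prices.length) :
    dur prices (prices.length - 1) = 0 := by
  rw [dur, nse]
  have h0 : prices.length - (prices.length - 1 + 1) = 0 := by omega
  rw [h0]
  dsimp only [List.range', List.find?]
  omega
theorem dur_penult (prices : List Int) (h2 : 2 ≤ prices.length) :
    dur prices (prices.length - 2) = 1 := by
  rw [dur, nse]
  have h0 : prices.length - (prices.length - 2 + 1) = 1 := by omega
  have h1 : prices.length - 2 + 1 = prices.length - 1 := by omega
  rw [h0, h1, List.range'_one, List.find?_cons]
  by_cases h : prices.getD (prices.length - 1) 0 < prices.getD (prices.length - 2) 0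
  · simp only [h, decide_true]
    omega
  · simp only [h, decide_false]
    dsimp only [List.find?]
    omega
theorem solutionA_eq (prices : List Int) (h2 : 2 ≤ prices.length) :
    solution prices = (List.range prices.length).map (dur prices) := by
  unfold solution
  dsimp only
  have hc2 : ((prices.length : Int) - 2) = ((prices.length - 2 : Nat) : Int) := by omega
  rw [hc2, PySem.List.slice_from_natCast]
  cases hmin : PySem.List.min? (prices.drop (prices.length - 2)) (fun x => x) with
  | none =>
      exfalso
      have := (PySem.List.min?_eq_none_iff _ _).mp hmin
      have hlen := congrArg List.length this
      simp at hlen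
      omega
  | some m0 =>
      dsimp only
      show (List.foldl (stepA prices) ([0, 1], 1, m0)
        (PySem.List.pyRange ((prices.length : Int) - 3) (-1) (-1))).1.reverse = _
      have hmem := PySem.List.min?_mem hmin
      have hismin := PySem.List.min?_isMin hmin
      have hr : ((prices.length : Int) - 3) = ((prices.length - 2 : Nat) : Int) - 1 := by omega
      have hn : (1 : Int) = (prices.length : Int) - 1 - ((prices.length - 2 : Nat) : Int) := by omega
      have hl := loopA prices (prices.length - 2) (by omega) [0, 1] m0 hismin hmem
      rw [← hn] at hl
      rw [hr, hl]
      rw [List.reverse_append, ← List.map_reverse, List.reverse_reverse]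
      have hsplit : List.range prices.length
          = List.range (prices.length - 2) ++ [prices.length - 2, prices.length - 1] := by
        have e1 : prices.length = (prices.length - 2) + 1 + 1 := by omega
        rw [e1, List.range_succ, List.range_succ]
        simp
      rw [hsplit, List.map_append]
      simp [dur_last prices (by omega), dur_penult prices h2]

-- ---------- B-side ----------
theorem keeps_iff (prices : List Int) (i j : Nat) :
    keeps prices i j = true ↔
      ∀ k, j < k → k < i → ¬ (prices.getD k 0 < prices.getD j 0) := by
  rw [keeps, List.all_eq_true]
  constructor
  · intro h k h1 h2
    have := h k (by rw [List.mem_range'_1]; omega)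
    simpa using this
  · intro h k hk
    rw [List.mem_range'_1] at hk
    simpa using h k (by omega) (by omega)
theorem nse_some_iff (prices : List Int) (q i : Nat) :
    nse prices q = some i ↔
      q < i ∧ i < prices.length ∧ prices.getD i 0 < prices.getD q 0 ∧
        keeps prices i q = true := by
  rw [nse, List.find?_eq_some_iff_getElem]
  constructor
  · rintro ⟨hp, m, hm, hval, hfirst⟩
    simp only [List.getElem_range'] at hval
    have hmlen : m < prices.length - (q + 1) := by simpa using hm
    subst hval
    refine ⟨by omega, by omega, by simpa using hp, ?_⟩
    rw [keeps_iff]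
    intro k h1 h2
    have hk : k - (q + 1) < m := by omega
    have := hfirst (k - (q + 1)) (by omega)
    simp only [List.getElem_range'] at this
    have hke : q + 1 + 1 * (k - (q + 1)) = k := by omega
    rw [hke] at this
    simpa using this
  · rintro ⟨h1, h2, h3, h4⟩
    refine ⟨by simpa using h3, i - (q + 1), by simp; omega, ?_, ?_⟩
    · rw [List.getElem_range']; omega
    · intro m hm
      rw [keeps_iff] at h4
      simp only [List.getElem_range']
      have := h4 (q + 1 + 1 * m) (by omega) (by omega)
      simpa using this
theorem nse_none_iff (prices : List Int) (q : Nat) :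
    nse prices q = none ↔ keeps prices prices.length q = true := by
  rw [nse, List.find?_eq_none, keeps_iff]
  constructor
  · intro h k h1 h2
    simpa using h k (by rw [List.mem_range'_1]; omega)
  · intro h k hk
    rw [List.mem_range'_1] at hk
    simpa using h k (by omega) (by omega)
theorem foldl_id_of_none (prices : List Int) (i : Nat) (p : Int) :
    ∀ (S : List Nat) (A : List Int), (∀ j ∈ S, ¬ p < prices.getD j 0) →
      S.foldl (fun a j => if p < prices.getD j 0 then a.set j ((i : Int) - (j : Int)) else a) A
        = A := by
  intro S
  induction S with
  | nil => intro A _; rfl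
  | cons j rest ih =>
      intro A h
      rw [List.foldl_cons, if_neg (h j List.mem_cons_self)]
      exact ih A (fun x hx => h x (List.mem_cons_of_mem _ hx))
theorem popLoop_eq (prices : List Int) (i : Nat) (p : Int) :
    ∀ (S : List Nat) (answer : List Int),
      (∀ j' j, j' ∈ S → j ∈ S → j' < j → prices.getD j' 0 ≤ prices.getD j 0) →
      S.Pairwise (· > ·) →
      popLoop prices i p answer S =
        (S.foldl (fun a j => if p < prices.getD j 0 then a.set j ((i : Int) - (j : Int)) else a)
          answer,
         S.filter (fun j => !(decide (p < prices.getD j 0)))) := by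
  intro S
  induction S with
  | nil => intro answer _ _; rfl
  | cons j rest ih =>
      intro answer hm hp
      rw [popLoop]
      by_cases h : p < prices.getD j 0
      · rw [if_pos h, ih (answer.set j ((i : Int) - (j : Int)))
          (fun a b ha hb => hm a b (List.mem_cons_of_mem _ ha) (List.mem_cons_of_mem _ hb))
          (List.Pairwise.of_cons hp), List.foldl_cons, if_pos h, List.filter_cons]
        simp only [h, decide_true, Bool.not_true]
        simp
      · rw [if_neg h, List.foldl_cons, if_neg h]
        have hall : ∀ x ∈ rest, ¬ p < prices.getD x 0 := by
          intro x hx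
          have hxj : x < j := (List.pairwise_cons.mp hp).1 x hx
          have := hm x j (List.mem_cons_of_mem _ hx) List.mem_cons_self hxj
          omega
        rw [foldl_id_of_none prices i p rest answer hall, List.filter_cons]
        have hfr : rest.filter (fun x => !(decide (p < prices.getD x 0))) = rest :=
          List.filter_eq_self.mpr (fun x hx => by simpa using hall x hx)
        simp only [h, decide_false, Bool.not_false]
        simp only [List.getD_eq_getElem?_getD] at hfr
        simp [hfr]
theorem foldl_cond_set (P : Nat → Prop) [DecidablePred P] (v : Nat → Int) :
    ∀ (S : List Nat) (A : List Int), S.Nodup → ∀ q : Nat,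
      (S.foldl (fun a j => if P j then a.set j (v j) else a) A)[q]? =
        if q ∈ S ∧ P q ∧ q < A.length then some (v q) else A[q]? := by
  intro S
  induction S with
  | nil => intro A _ q; simp
  | cons j rest ih =>
      intro A hnd q
      rcases List.nodup_cons.mp hnd with ⟨hjr, hnd2⟩
      rw [List.foldl_cons]
      by_cases hP : P j
      · rw [if_pos hP, ih (A.set j (v j)) hnd2 q, List.length_set, List.getElem?_set]
        by_cases hqj : q = j
        · subst hqj
          rw [if_neg (fun h => hjr h.1), if_pos rfl]
          by_cases hlen : q < A.length
          · rw [if_pos hlen, if_pos ⟨List.mem_cons_self, hP, hlen⟩]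
          · rw [if_neg hlen, if_neg (fun h => hlen h.2.2), List.getElem?_eq_none (by omega)]
        · rw [if_neg (fun h => hqj (Eq.symm h))]
          by_cases hc : q ∈ rest ∧ P q ∧ q < A.length
          · rw [if_pos hc, if_pos ⟨List.mem_cons_of_mem _ hc.1, hc.2⟩]
          · rw [if_neg hc, if_neg (fun h => hc ⟨(List.mem_cons.mp h.1).resolve_left hqj, h.2⟩)]
      · rw [if_neg hP, ih A hnd2 q]
        by_cases hqj : q = j
        · subst hqj
          rw [if_neg (fun h => hP h.2.1), if_neg (fun h => hP h.2.1)]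
        · by_cases hc : q ∈ rest ∧ P q ∧ q < A.length
          · rw [if_pos hc, if_pos ⟨List.mem_cons_of_mem _ hc.1, hc.2⟩]
          · rw [if_neg hc, if_neg (fun h => hc ⟨(List.mem_cons.mp h.1).resolve_left hqj, h.2⟩)]
theorem mem_stk (prices : List Int) (i q : Nat) :
    q ∈ stk prices i ↔ q < i ∧ keeps prices i q = true := by
  simp [stk, List.mem_filter, List.mem_range]
theorem keeps_succ (prices : List Int) (i j : Nat) (hj : j < i) :
    keeps prices (i + 1) j =
      (!(decide (prices.getD i 0 < prices.getD j 0)) && keeps prices i j) := by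
  rw [Bool.eq_iff_iff, Bool.and_eq_true, Bool.not_eq_true', decide_eq_false_iff_not,
    keeps_iff, keeps_iff]
  constructor
  · intro h
    exact ⟨h i hj (by omega), fun k h1 h2 => h k h1 (by omega)⟩
  · rintro ⟨h1, h2⟩ k hk1 hk2
    by_cases hki : k = i
    · subst hki; exact h1
    · exact h2 k hk1 (by omega)
theorem stk_pairwise (prices : List Int) (i : Nat) : (stk prices i).Pairwise (· > ·) := by
  rw [stk, List.pairwise_reverse]
  exact List.Pairwise.filter _ (List.pairwise_lt_range)
theorem stk_nodup (prices : List Int) (i : Nat) : (stk prices i).Nodup := by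
  rw [stk, List.nodup_reverse]
  exact List.Nodup.filter _ (List.nodup_range)
theorem stk_mono (prices : List Int) (i : Nat) :
    ∀ j' j, j' ∈ stk prices i → j ∈ stk prices i → j' < j →
      prices.getD j' 0 ≤ prices.getD j 0 := by
  intro j' j h1 h2 hlt
  rw [mem_stk] at h1 h2
  have := (keeps_iff prices i j').mp h1.2 j hlt h2.1
  omega
theorem ansAt_zero (prices : List Int) (j : Nat) : ansAt prices 0 j = 0 := by
  rw [ansAt]
  cases nse prices j with
  | none => rfl
  | some k => simp
theorem map_ansAt_step (prices : List Int) (i : Nat) (hi : i < prices.length) :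
    ((stk prices i).foldl
      (fun a j => if prices.getD i 0 < prices.getD j 0 then a.set j ((i : Int) - (j : Int)) else a)
      ((List.range prices.length).map (ansAt prices i)))
    = (List.range prices.length).map (ansAt prices (i + 1)) := by
  apply List.ext_getElem?
  intro q
  rw [foldl_cond_set (fun j => prices.getD i 0 < prices.getD j 0) _ _ _ (stk_nodup prices i) q]
  by_cases hq : q < prices.length
  · have hA : ((List.range prices.length).map (ansAt prices i))[q]? = some (ansAt prices i q) := by
      simp [hq]
    have hB : ((List.range prices.length).map (ansAt prices (i + 1)))[q]? = some (ansAt prices (i + 1) q) := by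
      simp [hq]
    rw [hA, hB]
    simp only [List.length_map, List.length_range]
    by_cases hcond : q ∈ stk prices i ∧ prices.getD i 0 < prices.getD q 0
    · rw [if_pos ⟨hcond.1, hcond.2, hq⟩]
      have hmq := (mem_stk prices i q).mp hcond.1
      have hsome : nse prices q = some i :=
        (nse_some_iff prices q i).mpr ⟨hmq.1, hi, hcond.2, hmq.2⟩
      rw [ansAt, hsome]
      simp
    · rw [if_neg (fun h => hcond ⟨h.1, h.2.1⟩)]
      congr 1
      rw [ansAt, ansAt]
      cases hn : nse prices q with
      | none => rfl
      | some k =>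
          by_cases hki : k = i
          · exfalso
            subst hki
            obtain ⟨hqk, _, hlt, hkeeps⟩ := (nse_some_iff prices q k).mp hn
            exact hcond ⟨(mem_stk prices k q).mpr ⟨hqk, hkeeps⟩, hlt⟩
          · dsimp only
            by_cases hk : k < i
            · rw [if_pos hk, if_pos (by omega)]
            · rw [if_neg hk, if_neg (by omega)]
  · simp [hq]
theorem keeps_self_succ (prices : List Int) (i : Nat) : keeps prices (i + 1) i = true := by
  rw [keeps_iff]
  intro k h1 h2
  omega
theorem stk_succ (prices : List Int) (i : Nat) :
    stk prices (i + 1) = i :: ((List.range i).filter (keeps prices (i + 1))).reverse := by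
  rw [stk, List.range_succ, List.filter_append, List.reverse_append]
  rw [show List.filter (keeps prices (i + 1)) [i] = [i] by
    simp [keeps_self_succ prices i]]
  rfl
theorem stepB (prices : List Int) (i : Nat) (hi : i < prices.length) :
    popLoop prices i (prices.getD i 0)
        ((List.range prices.length).map (ansAt prices i)) (stk prices i)
      = ((List.range prices.length).map (ansAt prices (i + 1)),
         ((List.range i).filter (keeps prices (i + 1))).reverse) := by
  rw [popLoop_eq prices i (prices.getD i 0) (stk prices i) _
    (stk_mono prices i) (stk_pairwise prices i)]
  rw [Prod.mk.injEq]
  constructor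
  · exact map_ansAt_step prices i hi
  · rw [stk, List.filter_reverse, List.filter_filter]
    congr 1
    apply List.filter_congr
    intro j hj
    rw [List.mem_range] at hj
    exact (keeps_succ prices i j hj).symm
theorem mainLoopB_inv (prices : List Int) :
    ∀ (t i : Nat), i + t = prices.length →
      mainLoopB prices i (prices.drop i)
          ((List.range prices.length).map (ansAt prices i)) (stk prices i) =
        ((List.range prices.length).map (ansAt prices prices.length),
         stk prices prices.length) := by
  intro t
  induction t with
  | zero =>
      intro i hi
      have : i = prices.length := by omega
      subst this
      rw [List.drop_length, mainLoopB]
  | succ t ih =>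
      intro i hi
      have hilt : i < prices.length := by omega
      rw [List.drop_eq_getElem_cons hilt, mainLoopB]
      rw [← List.getD_eq_getElem prices 0 hilt, stepB prices i hilt]
      rw [show (i :: ((List.range i).filter (keeps prices (i + 1))).reverse) = stk prices (i + 1)
        from (stk_succ prices i).symm]
      exact ih (i + 1) (by omega)
theorem foldl_set_getElem? (v : Nat → Int) :
    ∀ (S : List Nat) (A : List Int), S.Nodup → ∀ q : Nat,
      (S.foldl (fun a j => a.set j (v j)) A)[q]? =
        if q ∈ S ∧ q < A.length then some (v q) else A[q]? := by
  intro S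
  induction S with
  | nil => intro A _ q; simp
  | cons j rest ih =>
      intro A hnd q
      rcases List.nodup_cons.mp hnd with ⟨hjr, hnd2⟩
      rw [List.foldl_cons, ih (A.set j (v j)) hnd2 q, List.length_set, List.getElem?_set]
      by_cases hqj : q = j
      · subst hqj
        rw [if_neg (fun h => hjr h.1), if_pos rfl]
        by_cases hlen : q < A.length
        · rw [if_pos hlen, if_pos ⟨List.mem_cons_self, hlen⟩]
        · rw [if_neg hlen, if_neg (fun h => hlen h.2), List.getElem?_eq_none (by omega)]
      · rw [if_neg (fun h => hqj (Eq.symm h))]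
        by_cases hc : q ∈ rest ∧ q < A.length
        · rw [if_pos hc, if_pos ⟨List.mem_cons_of_mem _ hc.1, hc.2⟩]
        · rw [if_neg hc, if_neg (fun h => hc ⟨(List.mem_cons.mp h.1).resolve_left hqj, h.2⟩)]
theorem solutionB_eq (prices : List Int) :
    solution_alt prices = (List.range prices.length).map (dur prices) := by
  unfold solution_alt
  dsimp only
  have h0 : (List.replicate prices.length (0 : Int))
      = (List.range prices.length).map (ansAt prices 0) := by
    rw [List.map_congr_left (fun j _ => ansAt_zero prices j), List.map_const', List.length_range]
  have hstk0 : ([] : List Nat) = stk prices 0 := by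
    simp [stk]
  have hinv := mainLoopB_inv prices prices.length 0 (by omega)
  rw [List.drop_zero] at hinv
  rw [h0, hstk0, hinv]
  dsimp only
  rw [stk, List.reverse_reverse]
  apply List.ext_getElem?
  intro q
  rw [foldl_set_getElem? _ _ _ (List.Nodup.filter _ List.nodup_range) q]
  by_cases hq : q < prices.length
  · have hA : ((List.range prices.length).map (ansAt prices prices.length))[q]?
        = some (ansAt prices prices.length q) := by simp [hq]
    have hB : ((List.range prices.length).map (dur prices))[q]? = some (dur prices q) := by
      simp [hq]
    rw [hA, hB]
    simp only [List.length_map, List.length_range]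
    by_cases hk : keeps prices prices.length q = true
    · have hnone : nse prices q = none := (nse_none_iff prices q).mpr hk
      rw [if_pos ⟨List.mem_filter.mpr ⟨List.mem_range.mpr hq, hk⟩, hq⟩, dur, hnone]
    · rw [if_neg (fun h => hk (List.mem_filter.mp h.1).2)]
      congr 1
      cases hn : nse prices q with
      | none => exact absurd ((nse_none_iff prices q).mp hn) hk
      | some k =>
          have hkn := ((nse_some_iff prices q k).mp hn).2.1
          rw [ansAt, dur, hn]
          simp [hkn]
  · simp [hq]

theorem solution_singleton (p : Int) : solution [p] = [1, 0] := by
  unfold solution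
  dsimp only
  rw [show ((([p] : List Int).length : Int) - 2) = -1 by simp]
  rw [PySem.List.slice_from_neg_one]
  simp only [List.length_cons, List.length_nil]
  rw [show (1 - 1 : Nat) = 0 from rfl, List.drop_zero]
  rw [show PySem.List.min? [p] (fun x => x) = some p from rfl]
  rw [PySem.List.pyRange_neg_one_eq_nil
    (show (((0 + 1 : Nat) : Int) - 3) ≤ -1 by norm_num)]
  rfl

-- ===== VERDICT (by name: the statement is the Claim_ definition above) =====
theorem solution_spec : Claim_unchanged_solution := by
  intro prices _ hpre hD
  have h2 : 2 ≤ prices.length := by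
    rcases prices with _ | ⟨a, _ | ⟨b, t⟩⟩
    · exact absurd rfl hpre
    · exact absurd rfl hD
    · simp
  rw [solutionA_eq prices h2, solutionB_eq prices]

theorem solution_changed : Claim_changed_solution := by
  unfold Claim_changed_solution; decide

theorem solution_tight : Claim_exact_solution := by
  intro prices _ _ hD h
  unfold D_solution at hD
  match prices, hD with
  | [p], _ =>
      rw [solution_singleton p, solutionB_eq] at h
      have := congrArg List.length h
      simp at this
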